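-- pv_equiv track=rewrite | github.com/cirosantilli/project-euler-solutions | solvers/706.py | f_of_int
-- ===== SOURCE A (Python) =====
-- def f_of_int(n: int) -> int:
--     """
--     Count substrings divisible by 3 for a (small) integer n.
--
--     Uses the standard prefix-sum mod 3 trick:
--     substring i..j is divisible by 3 <=> prefix_mod[j] == prefix_mod[i-1].
--     """
--     s = str(n)
--     cnt = [0, 0, 0]
--     cnt[0] = 1  # empty prefix
--     pref = 0
--     total = 0
--     for ch in s:
--         pref = (pref + (ord(ch) - 48)) % 3
--         total += cnt[pref]
--         cnt[pref] += 1
--     return total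
-- ===== SOURCE B (Python) =====
-- def f_of_int(n: int) -> int:
--     """
--     Count substrings of str(n) whose digit-value sum is divisible by 3,
--     by directly scanning every non-empty substring with a running sum.
--     """
--     s = str(n)
--     ans = 0
--     for i in range(len(s)):
--         total = 0
--         for j in range(i, len(s)):
--             total += ord(s[j]) - 48
--             if total % 3 == 0:
--                 ans += 1
--     return ans
-- ===== Notes on version B (the rewrite author's own statement) =====
-- stated objective: simpler
-- what changed: Replaces the prefix-mod-3 counting trick (a 3-slot count array updated in one pass) with a direct nested scan: for every start index keep a running digit-value sum over ord(c)-48 and count each position where it is divisible by 3.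
import Mathlib
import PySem

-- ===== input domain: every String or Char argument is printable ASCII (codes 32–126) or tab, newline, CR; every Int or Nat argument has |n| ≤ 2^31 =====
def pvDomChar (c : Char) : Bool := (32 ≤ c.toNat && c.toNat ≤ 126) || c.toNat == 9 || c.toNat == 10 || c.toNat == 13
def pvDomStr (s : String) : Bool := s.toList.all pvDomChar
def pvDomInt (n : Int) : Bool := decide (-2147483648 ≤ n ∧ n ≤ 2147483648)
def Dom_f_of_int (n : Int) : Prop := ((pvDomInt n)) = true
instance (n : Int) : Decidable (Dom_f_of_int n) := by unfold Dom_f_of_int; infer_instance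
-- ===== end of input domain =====

-- B replaces A's one-pass prefix-mod-3 count-array trick by a direct nested scan of every
-- non-empty substring with a running digit-value sum (simpler to read; not faster).

-- ===== PORT A =====
-- one step of A's loop body; state is (cnt, pref, total)
def aStep (st : List Int × Int × Int) (ch : Char) : List Int × Int × Int :=
  let pref := PySem.Int.mod (st.2.1 + ((ch.toNat : Int) - 48)) 3
  let total := st.2.2 + PySem.List.pyGetD st.1 pref 0
  let cnt := PySem.List.pySetD st.1 pref (PySem.List.pyGetD st.1 pref 0 + 1)
  (cnt, pref, total)

def f_of_int (n : Int) : Int :=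
  let s := PySem.Int.toChars n   -- s = str(n)
  -- cnt = [0, 0, 0]; cnt[0] = 1   (pref always lies in 0..2, so pyGetD/pySetD are exact)
  let cnt0 := PySem.List.pySetD ([0, 0, 0] : List Int) 0 1
  (s.foldl aStep (cnt0, 0, 0)).2.2

-- ===== PORT B =====
-- one step of B's inner loop; state is (total, ans), consuming the character s[j]
def bStep (st : Int × Int) (ch : Char) : Int × Int :=
  let total := st.1 + ((ch.toNat : Int) - 48)
  (total, if PySem.Int.mod total 3 = 0 then st.2 + 1 else st.2)

def f_of_int_alt (n : Int) : Int :=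
  let s := PySem.Int.toChars n
  (PySem.List.pyRange 0 (PySem.List.len s) 1).foldl
    (fun ans i =>
      ((PySem.List.pyRange i (PySem.List.len s) 1).foldl
        (fun st j => bStep st (PySem.List.pyGetD s j ' ')) (0, ans)).2)
    0

-- ===== PRECONDITION & SPEC =====
def Spec_f_of_int (n : Int) (out : Int) : Prop := out = f_of_int_alt n
instance (n : Int) (out : Int) : Decidable (Spec_f_of_int n out) := by unfold Spec_f_of_int; infer_instance

-- ===== CLAIM (what is proved, stated in full; the proofs are below) =====
def Claim_equal_f_of_int : Prop := ∀ (n : Int), Dom_f_of_int n → Spec_f_of_int n (f_of_int n)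

-- ===== LEMMAS AND PROOFS =====

def dv (c : Char) : Int := (c.toNat : Int) - 48

def mods (p : Int) : List Int → List Int
  | [] => []
  | x :: t => (p + x) % 3 :: mods ((p + x) % 3) t

def pairs : List Int → Int
  | [] => 0
  | x :: m => (m.count x : Int) + pairs m

def cross (c0 c1 c2 : Int) (m : List Int) : Int :=
  (m.map (fun r => if r = 0 then c0 else if r = 1 then c1 else c2)).sum

theorem cross_one_zero_zero (m : List Int) : cross 1 0 0 m = (m.count 0 : Int) := by
  induction m with
  | nil => simp [cross]
  | cons r m ih =>
    simp only [cross, List.map_cons, List.sum_cons, List.count_cons] at ih ⊢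
    by_cases h : r = 0 <;> simp [h] at ih ⊢ <;> omega

theorem cross_bump (c0 c1 c2 j : Int) (m : List Int)
    (hj : j = 0 ∨ j = 1 ∨ j = 2) (hm : ∀ r ∈ m, 0 ≤ r ∧ r < 3) :
    cross (if j = 0 then c0 + 1 else c0) (if j = 1 then c1 + 1 else c1)
      (if j = 2 then c2 + 1 else c2) m = cross c0 c1 c2 m + (m.count j : Int) := by
  induction m with
  | nil => simp [cross]
  | cons r m ih =>
    have hr := hm r (by simp)
    have hrest : ∀ r ∈ m, 0 ≤ r ∧ r < 3 := fun r hr => hm r (by simp [hr])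
    have hr3 : r = 0 ∨ r = 1 ∨ r = 2 := by omega
    have ih' := ih hrest
    simp only [cross, List.map_cons, List.sum_cons, List.count_cons] at ih' ⊢
    rcases hj with hj | hj | hj <;> rcases hr3 with h | h | h <;>
      subst hj <;> subst h <;> simp at ih' ⊢ <;> omega

theorem countShift (l : List Int) (p q r s : Int)
    (hr : 0 ≤ r ∧ r < 3) (hs : 0 ≤ s ∧ s < 3) (h : (3 : Int) ∣ (r - p) - (s - q)) :
    (mods p l).count r = (mods q l).count s := by
  induction l generalizing p q with
  | nil => simp [mods]
  | cons x t ih =>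
    simp only [mods, List.count_cons]
    have hhead : ((p + x) % 3 = r) ↔ ((q + x) % 3 = s) := by omega
    rw [ih ((p + x) % 3) ((q + x) % 3) (by omega)]
    by_cases hc : (p + x) % 3 = r
    · simp [hc, hhead.mp hc]
    · have hc2 : ¬((q + x) % 3 = s) := fun hcs => hc (hhead.mpr hcs)
      simp [hc, hc2]

theorem mods_mem (l : List Int) (p r : Int) (h : r ∈ mods p l) : 0 ≤ r ∧ r < 3 := by
  induction l generalizing p with
  | nil => simp [mods] at h
  | cons x t ih =>
    simp only [mods, List.mem_cons] at h
    rcases h with h | h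
    · subst h; constructor <;> omega
    · exact ih _ h

theorem aInv (cs : List Char) (c0 c1 c2 p t0 : Int) :
    (cs.foldl aStep ([c0, c1, c2], p, t0)).2.2 =
      t0 + cross c0 c1 c2 (mods p (cs.map dv)) + pairs (mods p (cs.map dv)) := by
  induction cs generalizing c0 c1 c2 p t0 with
  | nil => simp [mods, cross, pairs]
  | cons ch t ih =>
    have hmod : PySem.Int.mod (p + ((ch.toNat : Int) - 48)) 3 = (p + dv ch) % 3 := by
      rw [PySem.Int.mod_eq_emod_of_pos (by omega)]; rfl
    set p' := (p + dv ch) % 3 with hp'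
    have hp'r : p' = 0 ∨ p' = 1 ∨ p' = 2 := by omega
    have key : ∀ r ∈ mods p' (t.map dv), 0 ≤ r ∧ r < 3 := fun r h => mods_mem _ _ _ h
    have hstep : aStep ([c0, c1, c2], p, t0) ch =
        ([if p' = 0 then c0 + 1 else c0, if p' = 1 then c1 + 1 else c1,
          if p' = 2 then c2 + 1 else c2], p',
          t0 + (if p' = 0 then c0 else if p' = 1 then c1 else c2)) := by
      simp only [aStep, hmod]
      rcases hp'r with h | h | h <;> rw [h] <;>
        simp [PySem.List.pyGetD_of_nonneg, PySem.List.pySetD_of_nonneg]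
    rw [List.foldl_cons, hstep, ih]
    have hbump := cross_bump c0 c1 c2 p' (mods p' (t.map dv)) hp'r key
    simp only [List.map_cons, mods, ← hp', cross, List.map_cons, List.sum_cons, pairs] at hbump ⊢
    omega

theorem bInner (cs : List Char) (tot0 a : Int) :
    (cs.foldl bStep (tot0, a)).2 = a + ((mods (tot0 % 3) (cs.map dv)).count 0 : Int) := by
  induction cs generalizing tot0 a with
  | nil => simp [mods]
  | cons ch t ih =>
    have h1 : (tot0 % 3 + ((ch.toNat : Int) - 48)) % 3 = (tot0 + ((ch.toNat : Int) - 48)) % 3 := by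
      omega
    have h2 : PySem.Int.mod (tot0 + ((ch.toNat : Int) - 48)) 3 = (tot0 + ((ch.toNat : Int) - 48)) % 3 := by
      rw [PySem.Int.mod_eq_emod_of_pos (by omega)]
    simp only [List.foldl_cons, bStep, List.map_cons, mods, dv, h1, h2, ih, List.count_cons]
    by_cases hc : (tot0 + ((ch.toNat : Int) - 48)) % 3 = 0 <;> simp [hc] <;> omega

theorem pairs_eq_sum (d : List Int) (p : Int) (hp : 0 ≤ p ∧ p < 3) :
    pairs (p :: mods p d) =
      ((List.range d.length).map (fun i => ((mods 0 (d.drop i)).count 0 : Int))).sum := by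
  induction d generalizing p with
  | nil => simp [mods, pairs]
  | cons x t ih =>
    have ih' := ih ((p + x) % 3) ⟨by omega, by omega⟩
    have hshift : (mods ((p + x) % 3) t).count p = (mods (x % 3) t).count 0 :=
      countShift t _ _ _ _ hp ⟨by omega, by omega⟩ (by omega)
    have hhead : ((p + x) % 3 = p) ↔ (x % 3 = 0) := by omega
    rw [List.length_cons, List.range_succ_eq_map, List.map_cons, List.sum_cons, List.map_map]
    have hmapeq : ((List.range t.length).map
        ((fun i => ((mods 0 ((x :: t).drop i)).count 0 : Int)) ∘ Nat.succ)) =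
        (List.range t.length).map (fun i => ((mods 0 (t.drop i)).count 0 : Int)) := rfl
    rw [hmapeq, ← ih']
    simp only [mods, pairs, List.count_cons, List.drop_zero, zero_add] at *
    rw [hshift]
    by_cases hc : (p + x) % 3 = p
    · simp [hc, hhead.mp hc]
    · have hc2 : ¬(x % 3 = 0) := fun hx => hc (hhead.mpr hx)
      simp [hc, hc2]

theorem bEval (cs : List Char) :
    (PySem.List.pyRange 0 (PySem.List.len cs) 1).foldl
      (fun ans i =>
        ((PySem.List.pyRange i (PySem.List.len cs) 1).foldl
          (fun st j => bStep st (PySem.List.pyGetD cs j ' ')) (0, ans)).2) 0 =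
    ((List.range (cs.map dv).length).map
      (fun i => (((mods 0 ((cs.map dv).drop i)).count 0 : Int)))).sum := by
  have houter : ∀ (ans i : Int), i ∈ PySem.List.pyRange 0 (PySem.List.len cs) 1 →
      ((PySem.List.pyRange i (PySem.List.len cs) 1).foldl
        (fun st j => bStep st (PySem.List.pyGetD cs j ' ')) (0, ans)).2 =
      ans + (((mods 0 ((cs.drop i.toNat).map dv)).count 0 : Int)) := by
    intro ans i hi
    have h0i : 0 ≤ i := ((PySem.List.mem_pyRange_one).mp hi).1
    rw [PySem.List.foldl_pyRange_pyGetD cs ' ' bStep (0, ans) h0i, bInner]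
    norm_num
  rw [PySem.List.foldl_congr_mem _ _
      (fun ans i => ans + (((mods 0 ((cs.drop i.toNat).map dv)).count 0 : Int))) 0
      (fun ans i hi => houter ans i hi)]
  have hsum := PySem.List.foldl_add (PySem.List.pyRange 0 (PySem.List.len cs) 1)
      (fun i => (((mods 0 ((cs.drop i.toNat).map dv)).count 0 : Int))) 0
  rw [hsum]
  rw [PySem.List.pyRange_one, PySem.List.len_eq, List.map_map]
  simp [Function.comp_def, List.map_drop]

theorem a_eq_b (n : Int) : f_of_int n = f_of_int_alt n := by
  have h1 : f_of_int n = pairs (0 :: mods 0 ((PySem.Int.toChars n).map dv)) := by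
    show ((PySem.Int.toChars n).foldl aStep ([1, 0, 0], 0, 0)).2.2 = _
    rw [aInv, cross_one_zero_zero]
    simp [pairs]
  have h2 := bEval (PySem.Int.toChars n)
  rw [h1, pairs_eq_sum _ 0 ⟨le_refl 0, by omega⟩]
  exact h2.symm

-- ===== VERDICT (by name: the statement is the Claim_ definition above) =====
theorem f_of_int_spec : Claim_equal_f_of_int := by
  intro n _
  show f_of_int n = f_of_int_alt n
  exact a_eq_b n
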